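-- pv_equiv track=rewrite | github.com/svishal-aero/pymake | CStruct/CParser/main.py | __removeNewlines
-- ===== SOURCE A (Python) =====
-- def __removeNewlines(sections):
--     newSections   = []
--     insideMacro   = False
--     prevIsNewline = True
--     for section in sections:
--         newSection = ''
--         if section[0]=='"':
--             newSection = section
--         else:
--             for char in section:
--                 newSection += char
--                 if prevIsNewline:
--                     if char=='#': insideMacro = True
--                     elif char not in ' \t\n': prevIsNewline = False
--                 if char=='\n':
--                     prevIsNewline = True
--                     if insideMacro: insideMacro = False
--                     else: newSection = newSection[:-1]
--         if len(newSection)>0: newSections.append(newSection)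
--     return newSections
-- ===== SOURCE B (Python) =====
-- def __removeNewlines(sections):
--     newSections = []
--     insideMacro = False
--     prevIsNewline = True
--     for section in sections:
--         if section[0] == '"':
--             newSections.append(section)
--             continue
--         pieces = section.split('\n')
--         parts = []
--         for piece in pieces[:-1]:
--             macro = insideMacro or (prevIsNewline and piece.lstrip(' \t').startswith('#'))
--             parts.append(piece + '\n' if macro else piece)
--             insideMacro = False
--             prevIsNewline = True
--         last = pieces[-1]
--         insideMacro = insideMacro or (prevIsNewline and last.lstrip(' \t').startswith('#'))
--         prevIsNewline = prevIsNewline and all(c in ' \t#' for c in last)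
--         parts.append(last)
--         newSection = ''.join(parts)
--         if newSection:
--             newSections.append(newSection)
--     return newSections
-- ===== Notes on version B (the rewrite author's own statement) =====
-- stated objective: alternative
-- what changed: B replaces A's char-by-char scan with string appends and newline-deletion-after-append by a per-line decomposition: each section is split on '\n' once, each complete line's macro status is decided from the carried flags plus lstrip/startswith, and the line is emitted with or without its newline; the carried flags are updated per line, not per character.
import Mathlib
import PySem

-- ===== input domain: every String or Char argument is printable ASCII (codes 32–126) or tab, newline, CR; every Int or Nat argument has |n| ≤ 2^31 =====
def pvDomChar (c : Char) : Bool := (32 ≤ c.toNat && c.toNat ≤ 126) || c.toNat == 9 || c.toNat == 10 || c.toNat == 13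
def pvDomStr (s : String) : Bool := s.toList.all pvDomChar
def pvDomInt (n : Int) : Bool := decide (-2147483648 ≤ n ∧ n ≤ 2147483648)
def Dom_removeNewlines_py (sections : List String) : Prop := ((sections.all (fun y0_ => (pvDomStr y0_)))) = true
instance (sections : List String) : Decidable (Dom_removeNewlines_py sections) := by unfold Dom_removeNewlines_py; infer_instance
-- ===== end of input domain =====

-- B replaces A's char-by-char scan (with append-then-delete of newlines) by a per-line
-- decomposition: split each section on '\n', decide each line's isMac status from the
-- carried flags, emit lines with or without their newline; same cost, different structure.


-- ===== PORT A =====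
-- one character step of A's inner loop: append the char, update (insideMacro, prevIsNewline),
-- and on '\n' either keep it (isMac line) or delete it (newSection[:-1] = dropLast; exact,
-- the string always ends in the just-appended '\n' there)
def pvStepA (st : List Char × Bool × Bool) (c : Char) : List Char × Bool × Bool :=
  let ns := st.1 ++ [c]
  let p : Bool × Bool :=
    if st.2.2 then
      if c = '#' then (true, st.2.2)
      else if c = ' ' ∨ c = '\t' ∨ c = '\n' then (st.2.1, st.2.2)
      else (st.2.1, false)
    else (st.2.1, st.2.2)
  if c = '\n' then
    if p.1 then (ns, false, true) else (ns.dropLast, p.1, true)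
  else (ns, p.1, p.2)

-- one section of A's outer loop (state: newSections, insideMacro, prevIsNewline)
def pvSecA (acc : List String × Bool × Bool) (s : String) : List String × Bool × Bool :=
  if PySem.Str.pyGet? s 0 = some '"' then
    (if 0 < PySem.Str.len s then acc.1 ++ [s] else acc.1, acc.2.1, acc.2.2)
  else
    let r := s.toList.foldl pvStepA ([], acc.2.1, acc.2.2)
    (if 0 < r.1.length then acc.1 ++ [String.ofList r.1] else acc.1, r.2.1, r.2.2)

def removeNewlines_py (sections : List String) : List String :=
  (sections.foldl pvSecA ([], false, true)).1

-- ===== PORT B =====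
-- piece.lstrip(' \t').startswith('#')  (hand port, exact: drop leading spaces/tabs, test '#')
def pvSh : List Char → Bool
  | [] => false
  | c :: cs => if c = ' ' ∨ c = '\t' then pvSh cs else decide (c = '#')

-- all(c in ' \t#' for c in last)
def pvAllST (cs : List Char) : Bool := cs.all (fun c => decide (c = ' ' ∨ c = '\t' ∨ c = '#'))

-- section.split('\n')  (hand port of str.split with a single-char separator; exact)
def pvSplitNl : List Char → List (List Char)
  | [] => [[]]
  | c :: cs =>
    if c = '\n' then [] :: pvSplitNl cs
    else match pvSplitNl cs with
      | [] => [[c]]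
      | p :: ps => (c :: p) :: ps

-- one iteration of B's loop over pieces[:-1] (state: parts joined so far, insideMacro, prevIsNewline)
def pvPieceStepB (st : List Char × Bool × Bool) (piece : List Char) : List Char × Bool × Bool :=
  let isMac := st.2.1 || (st.2.2 && pvSh piece)
  (st.1 ++ (if isMac then piece ++ ['\n'] else piece), false, true)

-- one section of B's outer loop
def pvSecB (acc : List String × Bool × Bool) (s : String) : List String × Bool × Bool :=
  if PySem.Str.pyGet? s 0 = some '"' then (acc.1 ++ [s], acc.2.1, acc.2.2)
  else
    let pieces := pvSplitNl s.toList
    let r := pieces.dropLast.foldl pvPieceStepB ([], acc.2.1, acc.2.2)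
    let last := (pieces.getLast?).getD []
    let im := r.2.1 || (r.2.2 && pvSh last)
    let pn := r.2.2 && pvAllST last
    let ns := r.1 ++ last
    (if ns ≠ [] then acc.1 ++ [String.ofList ns] else acc.1, im, pn)

def removeNewlines_py_alt (sections : List String) : List String :=
  (sections.foldl pvSecB ([], false, true)).1

-- ===== PRECONDITION & SPEC =====
-- Pre_ excludes lists containing the empty string: there A raises IndexError on section[0].
def Pre_removeNewlines_py (sections : List String) : Prop := "" ∉ sections
instance (sections : List String) : Decidable (Pre_removeNewlines_py sections) := by unfold Pre_removeNewlines_py; infer_instance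
def pvWitness_removeNewlines_py : List String := ["#define X 1\n", "int a;\nint b;\n"]

def Spec_removeNewlines_py (sections : List String) (out : List String) : Prop := out = removeNewlines_py_alt sections
instance (sections : List String) (out : List String) : Decidable (Spec_removeNewlines_py sections out) := by unfold Spec_removeNewlines_py; infer_instance

-- ===== CLAIM (what is proved, stated in full; the proofs are below) =====
def Claim_equal_removeNewlines_py : Prop := ∀ (sections : List String), Dom_removeNewlines_py sections → Pre_removeNewlines_py sections → Spec_removeNewlines_py sections (removeNewlines_py sections)

-- ===== LEMMAS AND PROOFS =====

-- proof helper: A's flag update for a non-newline character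
def pvUpd (im pn : Bool) (c : Char) : Bool × Bool :=
  if pn then
    if c = '#' then (true, pn)
    else if c = ' ' ∨ c = '\t' ∨ c = '\n' then (im, pn)
    else (im, false)
  else (im, pn)

-- proof helper: B's per-section piece processing, recursively over the piece list
def pvPiecesB (im pn : Bool) : List (List Char) → List Char × Bool × Bool
  | [] => ([], im, pn)
  | [last] => (last, im || (pn && pvSh last), pn && pvAllST last)
  | p :: ps =>
    let isMac := im || (pn && pvSh p)
    let r := pvPiecesB false true ps
    ((if isMac then p ++ ['\n'] else p) ++ r.1, r.2.1, r.2.2)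

theorem pvSplitNl_ne_nil (cs : List Char) : pvSplitNl cs ≠ [] := by
  induction cs with
  | nil => simp [pvSplitNl]
  | cons c cs ih =>
    unfold pvSplitNl
    split
    · simp
    · cases h : pvSplitNl cs with
      | nil => simp
      | cons p ps => simp

theorem pvStepA_ne_newline (acc : List Char) (im pn : Bool) (c : Char) (hc : c ≠ '\n') :
    pvStepA (acc, im, pn) c = (acc ++ [c], (pvUpd im pn c).1, (pvUpd im pn c).2) := by
  simp [pvStepA, pvUpd, hc]

theorem pvStepA_newline (acc : List Char) (im pn : Bool) :
    pvStepA (acc, im, pn) '\n' = (if im then acc ++ ['\n'] else acc, false, true) := by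
  cases pn <;> cases im <;> simp [pvStepA]

-- the flag identities carrying a non-newline char into / out of a piece
theorem pvUpd_sh (im pn : Bool) (c : Char) (p : List Char) (hc : c ≠ '\n') :
    ((pvUpd im pn c).1 || ((pvUpd im pn c).2 && pvSh p)) = (im || (pn && pvSh (c :: p))) := by
  cases pn with
  | false => rw [pvUpd]; simp
  | true =>
    by_cases h1 : c = '#'
    · have hs : pvSh (c :: p) = true := by rw [pvSh]; simp [h1]
      rw [pvUpd, hs]; simp [h1]
    · by_cases h2 : c = ' ' ∨ c = '\t'
      · have hs : pvSh (c :: p) = pvSh p := by rw [pvSh]; simp [h2]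
        have h3 : c = ' ' ∨ c = '\t' ∨ c = '\n' := h2.imp id Or.inl
        rw [pvUpd, hs]; simp [h1, h3]
      · have hs : pvSh (c :: p) = false := by rw [pvSh]; simp [h2, h1]
        rw [pvUpd, hs]; simp [h1, h2, hc]

theorem pvUpd_all (im pn : Bool) (c : Char) (p : List Char) (hc : c ≠ '\n') :
    ((pvUpd im pn c).2 && pvAllST p) = (pn && pvAllST (c :: p)) := by
  cases pn with
  | false => rw [pvUpd]; simp
  | true =>
    by_cases h3 : c = ' ' ∨ c = '\t' ∨ c = '#'
    · have ha : pvAllST (c :: p) = pvAllST p := by simp [pvAllST, h3]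
      rw [pvUpd, ha]
      rcases h3 with h3 | h3 | h3 <;> subst h3 <;> simp
    · have ha : pvAllST (c :: p) = false := by simp [pvAllST, h3]
      rw [pvUpd, ha]
      have h1 : ¬ c = '#' := fun h => h3 (Or.inr (Or.inr h))
      have h2 : ¬ (c = ' ' ∨ c = '\t' ∨ c = '\n') := by
        rintro (h|h|h)
        · exact h3 (Or.inl h)
        · exact h3 (Or.inr (Or.inl h))
        · exact hc h
      simp [h1, h2]

-- main per-section identity: A's char fold computes B's piece decomposition
theorem pvFold_eq_pieces (cs : List Char) (acc : List Char) (im pn : Bool) :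
    cs.foldl pvStepA (acc, im, pn) =
      ((acc ++ (pvPiecesB im pn (pvSplitNl cs)).1,
        (pvPiecesB im pn (pvSplitNl cs)).2.1,
        (pvPiecesB im pn (pvSplitNl cs)).2.2)) := by
  induction cs generalizing acc im pn with
  | nil =>
    simp [pvSplitNl, pvPiecesB, pvSh, pvAllST]
  | cons c cs ih =>
    have hne := pvSplitNl_ne_nil cs
    obtain ⟨p, ps, hps⟩ : ∃ p ps, pvSplitNl cs = p :: ps := by
      cases h : pvSplitNl cs with
      | nil => exact absurd h hne
      | cons p ps => exact ⟨p, ps, rfl⟩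
    by_cases hc : c = '\n'
    · subst hc
      rw [List.foldl_cons, pvStepA_newline, ih]
      have hsp : pvSplitNl ('\n' :: cs) = [] :: pvSplitNl cs := by rw [pvSplitNl]; simp
      rw [hsp, hps]
      simp only [pvPiecesB, pvSh]
      cases im <;> simp
    · rw [List.foldl_cons, pvStepA_ne_newline _ _ _ _ hc, ih]
      have hsp : pvSplitNl (c :: cs) = (c :: p) :: ps := by rw [pvSplitNl]; simp [hc, hps]
      rw [hsp, hps]
      cases ps with
      | nil =>
        simp only [pvPiecesB]
        refine Prod.ext ?_ (Prod.ext ?_ ?_)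
        · simp
        · exact pvUpd_sh im pn c p hc
        · exact pvUpd_all im pn c p hc
      | cons q qs =>
        simp only [pvPiecesB]
        rw [pvUpd_sh im pn c p hc]
        cases (im || (pn && pvSh (c :: p))) <;> simp

-- B's foldl-over-pieces[:-1] + last equals the recursive pvPiecesB
theorem pvFoldB_acc (L : List (List Char)) (a0 : List Char) (im pn : Bool) :
    L.foldl pvPieceStepB (a0, im, pn) =
      (a0 ++ (L.foldl pvPieceStepB ([], im, pn)).1, (L.foldl pvPieceStepB ([], im, pn)).2) := by
  induction L generalizing a0 im pn with
  | nil => simp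
  | cons x L ih =>
    rw [List.foldl_cons, List.foldl_cons]
    rw [show pvPieceStepB (a0, im, pn) x
          = (a0 ++ (if (im || (pn && pvSh x)) then x ++ ['\n'] else x), false, true) from rfl]
    rw [show pvPieceStepB ([], im, pn) x
          = ((if (im || (pn && pvSh x)) then x ++ ['\n'] else x), false, true) from by
        simp [pvPieceStepB]]
    rw [ih _ false true, ih (if (im || (pn && pvSh x)) then x ++ ['\n'] else x) false true]
    simp [List.append_assoc]

theorem pvSecB_pieces (pieces : List (List Char)) (im pn : Bool) (h : pieces ≠ []) :
    ((pieces.dropLast.foldl pvPieceStepB ([], im, pn)).1 ++ (pieces.getLast?.getD []),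
     (pieces.dropLast.foldl pvPieceStepB ([], im, pn)).2.1 ||
       ((pieces.dropLast.foldl pvPieceStepB ([], im, pn)).2.2 && pvSh (pieces.getLast?.getD [])),
     (pieces.dropLast.foldl pvPieceStepB ([], im, pn)).2.2 && pvAllST (pieces.getLast?.getD [])) =
      pvPiecesB im pn pieces := by
  obtain ⟨p, ps, rfl⟩ : ∃ p ps, pieces = p :: ps := by
    cases pieces with
    | nil => exact absurd rfl h
    | cons p ps => exact ⟨p, ps, rfl⟩
  clear h
  induction ps generalizing p im pn with
  | nil => simp [pvPiecesB]
  | cons q qs ih =>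
    have hd : (p :: q :: qs).dropLast = p :: (q :: qs).dropLast := rfl
    have hl : (p :: q :: qs).getLast? = (q :: qs).getLast? := List.getLast?_cons_cons
    have hstep : pvPieceStepB ([], im, pn) p
        = ((if (im || (pn && pvSh p)) then p ++ ['\n'] else p), false, true) := by
      simp [pvPieceStepB]
    rw [hd, hl, List.foldl_cons, hstep, pvFoldB_acc]
    simp only [pvPiecesB]
    rw [← ih]
    simp [List.append_assoc]

theorem pvQuoteLen (s : String) (h : PySem.Str.pyGet? s 0 = some '"') : 0 < PySem.Str.len s := by
  simp only [pysem] at *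
  cases hl : s.toList with
  | nil => rw [hl] at h; simp at h
  | cons c cs => simp

theorem pvIfLen (acc : List String) (ns : List Char) (im pn : Bool) :
    ((if 0 < ns.length then acc ++ [String.ofList ns] else acc : List String), im, pn)
      = ((if ns ≠ [] then acc ++ [String.ofList ns] else acc : List String), im, pn) := by
  cases ns <;> simp

theorem pvSecA_eq_pvSecB : pvSecA = pvSecB := by
  funext acc s
  obtain ⟨a1, im, pn⟩ := acc
  rw [pvSecA, pvSecB]
  by_cases hq : PySem.Str.pyGet? s 0 = some '"'
  · rw [if_pos hq, if_pos hq, if_pos (pvQuoteLen s hq)]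
  · rw [if_neg hq, if_neg hq]
    rw [pvFold_eq_pieces]
    have hp := pvSecB_pieces (pvSplitNl s.toList) im pn (pvSplitNl_ne_nil _)
    have h1 := congrArg (fun t => t.1) hp
    have h2 := congrArg (fun t => t.2.1) hp
    have h3 := congrArg (fun t => t.2.2) hp
    simp only at h1 h2 h3
    simp only [List.nil_append]
    rw [h1, h2, h3, pvIfLen]

-- ===== VERDICT (by name: the statement is the Claim_ definition above) =====
theorem removeNewlines_py_spec : Claim_equal_removeNewlines_py := by
  intro sections _ _
  show removeNewlines_py sections = removeNewlines_py_alt sections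
  unfold removeNewlines_py removeNewlines_py_alt
  rw [pvSecA_eq_pvSecB]
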